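-- pv_equiv track=rewrite | github.com/PongDev/2110101-COMP-PROG | Grader/09_MoreDC_34/09_MoreDC_34.py | pattern3
-- ===== SOURCE A (Python) =====
-- def pattern3(N):
--     r=[[0 for j in range(N)] for i in range(N)]
--
--     count=1
--     for i in range(N):
--         for j in range(N-i):
--             r[i][j+i]=count
--             count+=1
--     return r
-- ===== SOURCE B (Python) =====
-- def pattern3(N):
--     return [[1 + i*N - i*(i-1)//2 + (c - i) if c >= i else 0
--              for c in range(N)]
--             for i in range(N)]
-- ===== Notes on version B (the rewrite author's own statement) =====
-- stated objective: alternative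
-- what changed: Replaced the running counter and in-place cell mutation with a closed-form per-cell formula (triangular-number offset) computed independently for each (row, column) pair in a nested comprehension.
import Mathlib
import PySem

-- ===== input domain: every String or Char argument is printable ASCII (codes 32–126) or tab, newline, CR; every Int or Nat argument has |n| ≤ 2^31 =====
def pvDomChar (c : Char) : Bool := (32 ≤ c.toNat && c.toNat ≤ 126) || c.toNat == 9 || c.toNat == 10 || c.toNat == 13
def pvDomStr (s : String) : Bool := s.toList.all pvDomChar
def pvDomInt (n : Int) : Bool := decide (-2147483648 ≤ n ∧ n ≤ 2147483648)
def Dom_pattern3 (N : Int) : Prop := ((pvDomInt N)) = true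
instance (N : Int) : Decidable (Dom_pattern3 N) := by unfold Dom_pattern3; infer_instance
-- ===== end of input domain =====

-- B replaces A's running counter and in-place mutation by a closed-form per-cell formula (alternative decomposition, same asymptotic cost).

-- ===== PORT A =====
def pattern3 (N : Int) : List (List Int) :=
  let r : List (List Int) :=
    (PySem.List.pyRange 0 N 1).map (fun _i => (PySem.List.pyRange 0 N 1).map (fun _j => (0 : Int)))
  let st :=
    (PySem.List.pyRange 0 N 1).foldl
      (fun (st : List (List Int) × Int) i =>
        (PySem.List.pyRange 0 (N - i) 1).foldl
          (fun (st2 : List (List Int) × Int) j =>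
            (st2.1.modify i.toNat (fun row => row.set (j + i).toNat st2.2), st2.2 + 1)) st)
      (r, 1)
  st.1

-- ===== PORT B =====
def pattern3_alt (N : Int) : List (List Int) :=
  (PySem.List.pyRange 0 N 1).map (fun i =>
    (PySem.List.pyRange 0 N 1).map (fun c =>
      if i ≤ c then 1 + i * N - PySem.Int.floordiv (i * (i - 1)) 2 + (c - i) else 0))

-- ===== PRECONDITION & SPEC =====
def Spec_pattern3 (N : Int) (out : List (List Int)) : Prop := out = pattern3_alt N
instance (N : Int) (out : List (List Int)) : Decidable (Spec_pattern3 N out) := by unfold Spec_pattern3; infer_instance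

-- ===== CLAIM (what is proved, stated in full; the proofs are below) =====
def Claim_equal_pattern3 : Prop := ∀ (N : Int), Dom_pattern3 N → Spec_pattern3 N (pattern3 N)

-- ===== LEMMAS AND PROOFS =====

/-- The all-zero row of length `N`. -/
def pvZeros (N : Int) : List Int := (PySem.List.pyRange 0 N 1).map (fun _ => (0 : Int))

/-- B's closed-form row `i`. -/
def pvBRow (N i : Int) : List Int :=
  (PySem.List.pyRange 0 N 1).map (fun c =>
    if i ≤ c then 1 + i * N - PySem.Int.floordiv (i * (i - 1)) 2 + (c - i) else 0)

/-- Count value at the start of row `i`. -/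
def pvBase (N i : Int) : Int := 1 + i * N - PySem.Int.floordiv (i * (i - 1)) 2

/-- The effect of A's inner loop on a single row. -/
def pvGo (i : Int) (js : List Int) (row : List Int) (cnt : Int) : List Int :=
  match js with
  | [] => row
  | j :: js' => pvGo i js' (row.set (j + i).toNat cnt) (cnt + 1)

theorem pvGo_append (i : Int) (l1 l2 : List Int) (row : List Int) (c : Int) :
    pvGo i (l1 ++ l2) row c = pvGo i l2 (pvGo i l1 row c) (c + l1.length) := by
  induction l1 generalizing row c with
  | nil => simp [pvGo]
  | cons j l1 ih =>
      simp only [List.cons_append, pvGo, ih, List.length_cons]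
      congr 1
      push_cast
      ring

theorem pvGo_length (i : Int) (js : List Int) (row : List Int) (c : Int) :
    (pvGo i js row c).length = row.length := by
  induction js generalizing row c with
  | nil => rfl
  | cons j js ih => simp [pvGo, ih]

/-- A's pair-state inner fold = one `modify` of row `i` plus a counter bump. -/
theorem pvPairFold (i : Int) (js : List Int) (M : List (List Int)) (cnt : Int) :
    js.foldl
      (fun (st2 : List (List Int) × Int) j =>
        (st2.1.modify i.toNat (fun row => row.set (j + i).toNat st2.2), st2.2 + 1)) (M, cnt)
    = (M.modify i.toNat (fun row => pvGo i js row cnt), cnt + js.length) := by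
  induction js generalizing M cnt with
  | nil =>
      simp only [List.foldl_nil, pvGo, List.length_nil, Nat.cast_zero, add_zero]
      rw [show (fun row : List Int => row) = id from rfl, List.modify_id]
  | cons j js ih =>
      simp only [List.foldl_cons, ih, List.modify_modify_eq,
        Prod.mk.injEq, List.length_cons]
      exact ⟨rfl, by push_cast; ring⟩

/-- Elementwise description of the inner loop over `range(m)` writing into row positions `i+j`. -/
theorem pvGo_getElem? (i : Int) (hi : 0 ≤ i) (m : Nat) (row : List Int) (c : Int) (k : Nat)
    (hlen : i.toNat + m ≤ row.length) :
    (pvGo i (PySem.List.pyRange 0 (m : Int) 1) row c)[k]? =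
      if i.toNat ≤ k ∧ k < i.toNat + m then some (c + ((k : Int) - i)) else row[k]? := by
  induction m generalizing k with
  | zero =>
      rw [PySem.List.pyRange_one_eq_nil (by omega)]
      simp only [pvGo]
      rw [if_neg (by omega)]
  | succ m ih =>
      have hsplit : PySem.List.pyRange 0 ((m + 1 : Nat) : Int) 1
          = PySem.List.pyRange 0 (m : Int) 1 ++ [(m : Int)] := by
        have hcast : ((m + 1 : Nat) : Int) = (m : Int) + 1 := by push_cast; ring
        rw [hcast]
        exact PySem.List.pyRange_one_succ_right (by omega)
      rw [hsplit, pvGo_append]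
      simp only [pvGo]
      have hlenm : i.toNat + m ≤ row.length := by omega
      have hglen : (pvGo i (PySem.List.pyRange 0 (m : Int) 1) row c).length = row.length :=
        pvGo_length _ _ _ _
      have hpos : ((m : Int) + i).toNat = i.toNat + m := by omega
      rw [hpos]
      rw [List.getElem?_set]
      by_cases hk : i.toNat + m = k
      · subst hk
        rw [if_pos rfl, if_pos (by omega)]
        rw [if_pos (by omega)]
        congr 1
        have hlength : (PySem.List.pyRange 0 (m : Int) 1).length = m := by
          rw [PySem.List.length_pyRange_one]; omega
        rw [hlength]
        omega
      · rw [if_neg hk, ih k hlenm]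
        by_cases h1 : i.toNat ≤ k ∧ k < i.toNat + m
        · rw [if_pos h1, if_pos (by omega)]
        · rw [if_neg h1, if_neg (by omega)]

theorem pvZeros_getElem? (N : Int) (k : Nat) (hk : k < N.toNat) :
    (pvZeros N)[k]? = some 0 := by
  unfold pvZeros
  rw [List.getElem?_map, PySem.List.getElem?_pyRange_one]
  rw [if_pos (by omega)]
  rfl

theorem pvBRow_getElem? (N i : Int) (k : Nat) (hk : k < N.toNat) :
    (pvBRow N i)[k]? =
      some (if i ≤ (k : Int) then pvBase N i + ((k : Int) - i) else 0) := by
  unfold pvBRow pvBase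
  rw [List.getElem?_map, PySem.List.getElem?_pyRange_one]
  rw [if_pos (by omega)]
  simp only [Option.map_some, zero_add]

/-- The inner loop turns the all-zero row into B's closed-form row. -/
theorem pvRow (N i : Int) (_h0 : 0 ≤ i) (_hN : i < N) :
    pvGo i (PySem.List.pyRange 0 (N - i) 1) (pvZeros N) (pvBase N i) = pvBRow N i := by
  have hm : (N - i) = (((N - i).toNat : Nat) : Int) := by omega
  have hlenz : (pvZeros N).length = N.toNat := by
    unfold pvZeros; rw [List.length_map, PySem.List.length_pyRange_one]; omega
  apply List.ext_getElem?
  intro k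
  rw [hm, pvGo_getElem? i _h0 (N - i).toNat (pvZeros N) (pvBase N i) k
        (by rw [hlenz]; omega)]
  by_cases hk : k < N.toNat
  · rw [pvBRow_getElem? N i k hk]
    by_cases h1 : i.toNat ≤ k ∧ k < i.toNat + (N - i).toNat
    · rw [if_pos h1, if_pos (by omega)]
    · rw [if_neg h1, pvZeros_getElem? N k hk, if_neg (by omega)]
  · rw [if_neg (by omega)]
    have h2 : (pvZeros N)[k]? = none := by
      rw [List.getElem?_eq_none_iff, hlenz]; omega
    have h3 : (pvBRow N i)[k]? = none := by
      rw [List.getElem?_eq_none_iff]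
      unfold pvBRow
      rw [List.length_map, PySem.List.length_pyRange_one]; omega
    rw [h2, h3]

/-- The counter carried past row `a` reaches the start value of row `a+1`. -/
theorem pvBase_succ (N a : Int) (h0 : 0 ≤ a) (ha : a < N) :
    pvBase N a + ((N - a).toNat : Int) = pvBase N (a + 1) := by
  unfold pvBase
  rw [PySem.Int.floordiv_eq_ediv_of_pos (by norm_num),
      PySem.Int.floordiv_eq_ediv_of_pos (by norm_num)]
  obtain ⟨m, hm⟩ : Even ((a - 1) * ((a - 1) + 1)) := Int.even_mul_succ_self (a - 1)
  have h1 : a * (a - 1) = 2 * m := by nlinarith [hm]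
  have h2 : (a + 1) * (a + 1 - 1) = 2 * (m + a) := by nlinarith [hm]
  rw [h1, h2, Int.mul_ediv_cancel_left _ (by norm_num), Int.mul_ediv_cancel_left _ (by norm_num)]
  have h3 : ((N - a).toNat : Int) = N - a := by omega
  rw [h3]; ring

/-- `modify` at the junction of an append. -/
theorem pvModifyAppend (l1 : List (List Int)) (x : List Int) (l2 : List (List Int))
    (f : List Int → List Int) :
    (l1 ++ x :: l2).modify l1.length f = l1 ++ f x :: l2 := by
  induction l1 with
  | nil => simp [List.modify_zero_cons]
  | cons y l1 ih => simp [List.modify_succ_cons, ih]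

/-- Matrix state before processing row `a`: rows `< a` final, rows `≥ a` still zero. -/
def pvMat (N a : Int) : List (List Int) :=
  (PySem.List.pyRange 0 a 1).map (pvBRow N) ++ (PySem.List.pyRange a N 1).map (fun _ => pvZeros N)

/-- Loop invariant for A's outer loop. -/
theorem pvOuter (N a : Int) (h0 : 0 ≤ a) (ha : a ≤ N) :
    (PySem.List.pyRange a N 1).foldl
      (fun (st : List (List Int) × Int) i =>
        (PySem.List.pyRange 0 (N - i) 1).foldl
          (fun (st2 : List (List Int) × Int) j =>
            (st2.1.modify i.toNat (fun row => row.set (j + i).toNat st2.2), st2.2 + 1)) st)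
      (pvMat N a, pvBase N a)
    = (pvMat N N, pvBase N N) := by
  by_cases hlt : a < N
  case neg =>
    have haN : a = N := by omega
    subst haN
    rw [PySem.List.pyRange_one_eq_nil le_rfl]
    rfl
  case pos =>
    have hrec := pvOuter N (a + 1) (by omega) (by omega)
    rw [PySem.List.pyRange_one_cons hlt, List.foldl_cons, pvPairFold]
    have hstep1 : (pvMat N a).modify a.toNat
        (fun row => pvGo a (PySem.List.pyRange 0 (N - a) 1) row (pvBase N a)) = pvMat N (a + 1) := by
      unfold pvMat
      rw [PySem.List.pyRange_one_cons (a := a) (b := N) hlt, List.map_cons]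
      have hl1 : ((PySem.List.pyRange 0 a 1).map (pvBRow N)).length = a.toNat := by
        rw [List.length_map, PySem.List.length_pyRange_one]; omega
      rw [← hl1, pvModifyAppend, pvRow N a h0 hlt]
      rw [PySem.List.pyRange_one_succ_right (a := 0) (b := a) h0, List.map_append]
      simp
    have hstep2 : pvBase N a + ((PySem.List.pyRange 0 (N - a) 1).length : Int) = pvBase N (a + 1) := by
      rw [PySem.List.length_pyRange_one]
      have : ((N - a - 0).toNat : Int) = ((N - a).toNat : Int) := by omega
      rw [this]
      exact pvBase_succ N a h0 hlt
    rw [hstep1, hstep2]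
    exact hrec
termination_by (N - a).toNat
decreasing_by omega

theorem pattern3_alt_eq_map (N : Int) :
    pattern3_alt N = (PySem.List.pyRange 0 N 1).map (pvBRow N) := rfl

theorem pvMat_zero (N : Int) :
    pvMat N 0 = (PySem.List.pyRange 0 N 1).map (fun _ => pvZeros N) := by
  unfold pvMat
  rw [PySem.List.pyRange_one_eq_nil le_rfl]
  simp

theorem pvBase_zero (N : Int) : pvBase N 0 = 1 := by
  unfold pvBase
  norm_num [PySem.Int.floordiv_eq_ediv_of_pos]

-- ===== VERDICT (by name: the statement is the Claim_ definition above) =====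
theorem pattern3_spec : Claim_equal_pattern3 := by
  intro N _
  unfold Spec_pattern3
  by_cases hN : 0 ≤ N
  · have hinit : (PySem.List.pyRange 0 N 1).map
        (fun _i => (PySem.List.pyRange 0 N 1).map (fun _j => (0 : Int)))
        = pvMat N 0 := by rw [pvMat_zero]; rfl
    have hout := pvOuter N 0 le_rfl hN
    rw [pvBase_zero] at hout
    show ((PySem.List.pyRange 0 N 1).foldl
        (fun (st : List (List Int) × Int) i =>
          (PySem.List.pyRange 0 (N - i) 1).foldl
            (fun (st2 : List (List Int) × Int) j =>
              (st2.1.modify i.toNat (fun row => row.set (j + i).toNat st2.2), st2.2 + 1)) st)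
        ((PySem.List.pyRange 0 N 1).map
          (fun _i => (PySem.List.pyRange 0 N 1).map (fun _j => (0 : Int))), 1)).1
      = pattern3_alt N
    rw [hinit, hout, pattern3_alt_eq_map]
    unfold pvMat
    rw [PySem.List.pyRange_one_eq_nil (le_refl N)]
    simp
  · simp [pattern3, pattern3_alt, PySem.List.pyRange_one_eq_nil (show N ≤ 0 by omega)]
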